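-- pv_equiv track=rewrite | github.com/hojoungjang/programming-exercises | 10800-컬러볼/solution.py | solution
-- ===== SOURCE A (Python) =====
-- from collections import defaultdict
--
-- def solution(balls):
--     sorted_balls = sorted([(i, color, size) for i, (color, size) in enumerate(balls)], key=lambda x: (x[2]))
--     size_sums = [0 for _ in range(len(balls))]
--     size_run_sum = 0
--     color_sums = defaultdict(int)
--
--     same_size_idx = 0
--
--     for ball_id, color, size in sorted_balls:
--         while sorted_balls[same_size_idx][2] < size:
--             _, c, s = sorted_balls[same_size_idx]
--             color_sums[c] += s
--             size_run_sum += s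
--             same_size_idx += 1
--
--         size_sums[ball_id] = size_run_sum - color_sums.get(color, 0)
--
--     return size_sums
-- ===== SOURCE B (Python) =====
-- def solution(balls):
--     res = []
--     for color, size in balls:
--         total = 0
--         for c2, s2 in balls:
--             if s2 < size and c2 != color:
--                 total += s2
--         res.append(total)
--     return res
-- ===== Notes on version B (the rewrite author's own statement) =====
-- stated objective: simpler
-- what changed: Replaced the sort + running-sum + per-color-dict sweep by a direct double loop that, for each ball, sums the sizes of all strictly smaller balls of a different color.
import Mathlib
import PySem

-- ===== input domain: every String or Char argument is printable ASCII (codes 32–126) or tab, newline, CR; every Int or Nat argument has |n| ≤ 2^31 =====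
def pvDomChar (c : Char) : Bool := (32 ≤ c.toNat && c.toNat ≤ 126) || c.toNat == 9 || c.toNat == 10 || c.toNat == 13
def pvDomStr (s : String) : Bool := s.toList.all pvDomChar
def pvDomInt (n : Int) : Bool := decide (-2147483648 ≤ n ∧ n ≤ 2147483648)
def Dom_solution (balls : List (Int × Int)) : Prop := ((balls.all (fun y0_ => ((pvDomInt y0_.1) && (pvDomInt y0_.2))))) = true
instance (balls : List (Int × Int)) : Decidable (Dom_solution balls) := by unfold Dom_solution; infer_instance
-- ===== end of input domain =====

-- B replaces A's sort + running-sum + per-color-dict sweep by a plain double loop over the list (simpler; no speed claim).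

-- ===== PORT A =====
-- the inner 'while sorted_balls[same_size_idx][2] < size' loop of A; the fuel (remaining length)
-- and the 'none' branch are totality guards only: the Python loop always stops at or before the
-- current ball because the list is sorted by size
def solWhile (L : List (Int × Int × Int)) (s : Int) :
    Nat → PySem.Dict Int Int → Int → Nat → (PySem.Dict Int Int × Int × Nat)
  | 0, d, run, idx => (d, run, idx)
  | fuel+1, d, run, idx =>
    match L[idx]? with
    | some t =>
        if t.2.2 < s then
          solWhile L s fuel (d.modify t.2.1 0 (· + t.2.2)) (run + t.2.2) (idx + 1)
        else (d, run, idx)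
    | none => (d, run, idx)

-- the body of A's 'for ball_id, color, size in sorted_balls' loop;
-- state = (size_sums, color_sums, size_run_sum, same_size_idx)
def solBody (L : List (Int × Int × Int))
    (st : List Int × PySem.Dict Int Int × Int × Nat) (t : Int × Int × Int) :
    List Int × PySem.Dict Int Int × Int × Nat :=
  let r := solWhile L t.2.2 (L.length - st.2.2.2) st.2.1 st.2.2.1 st.2.2.2
  (PySem.List.pySetD st.1 t.1 (r.2.1 - PySem.Dict.getD r.1 t.2.1 0), r.1, r.2.1, r.2.2)

def solution (balls : List (Int × Int)) : List Int :=
  let sortedBalls := PySem.List.sorted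
    ((PySem.List.enumerate balls).map (fun p => (p.1, p.2.1, p.2.2))) (fun x => x.2.2) false
  (sortedBalls.foldl (solBody sortedBalls)
    (List.replicate balls.length (0 : Int), PySem.Dict.empty, (0 : Int), (0 : Nat))).1

-- ===== PORT B =====
def solution_alt (balls : List (Int × Int)) : List Int :=
  balls.foldl
    (fun res b =>
      res ++ [balls.foldl (fun tot x => if x.2 < b.2 ∧ x.1 ≠ b.1 then tot + x.2 else tot) (0 : Int)])
    []

-- ===== PRECONDITION & SPEC =====
def Spec_solution (balls : List (Int × Int)) (out : List Int) : Prop := out = solution_alt balls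
instance (balls : List (Int × Int)) (out : List Int) : Decidable (Spec_solution balls out) := by unfold Spec_solution; infer_instance

-- ===== CLAIM (what is proved, stated in full; the proofs are below) =====
def Claim_equal_solution : Prop := ∀ (balls : List (Int × Int)), Dom_solution balls → Spec_solution balls (solution balls)

-- ===== LEMMAS AND PROOFS =====

-- the per-ball value both programs compute: total size of strictly smaller balls of a different color
def gval (balls : List (Int × Int)) (b : Int × Int) : Int :=
  ((balls.filter (fun x => decide (x.2 < b.2 ∧ x.1 ≠ b.1))).map (·.2)).sum

def modStep (d : PySem.Dict Int Int) (t : Int × Int × Int) : PySem.Dict Int Int :=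
  d.modify t.2.1 0 (· + t.2.2)

def sumSz (K : List (Int × Int × Int)) : Int := (K.map (·.2.2)).sum

-- the value A writes for a ball t, read off the sorted list L
def valL (L : List (Int × Int × Int)) (t : Int × Int × Int) : Int :=
  sumSz (L.takeWhile (fun u => decide (u.2.2 < t.2.2))) -
    (((L.takeWhile (fun u => decide (u.2.2 < t.2.2))).filter (fun u => u.2.1 == t.2.1)).map (·.2.2)).sum

theorem solution_alt_eq_map (balls : List (Int × Int)) :
    solution_alt balls = balls.map (gval balls) := by
  unfold solution_alt
  rw [PySem.List.foldl_append_singleton_eq_map]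
  simp only [List.nil_append]
  apply List.map_congr_left
  intro b _
  rw [PySem.List.foldl_ite_eq_foldl_filter, PySem.List.foldl_add]
  simp [gval]

theorem while_spec (L : List (Int × Int × Int)) (s : Int) :
    ∀ (fuel idx : Nat) (d : PySem.Dict Int Int) (run : Int), L.length - idx ≤ fuel →
    solWhile L s fuel d run idx =
      (((L.drop idx).takeWhile (fun t => decide (t.2.2 < s))).foldl modStep d,
       run + sumSz ((L.drop idx).takeWhile (fun t => decide (t.2.2 < s))),
       idx + ((L.drop idx).takeWhile (fun t => decide (t.2.2 < s))).length) := by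
  intro fuel
  induction fuel with
  | zero =>
    intro idx d run h
    have hlen : L.length ≤ idx := by omega
    rw [List.drop_eq_nil_of_le hlen]
    simp [solWhile, sumSz]
  | succ fuel ih =>
    intro idx d run h
    rcases hidx : L[idx]? with _ | t
    · have hlen : L.length ≤ idx := by
        by_contra hc
        exact absurd hidx (by simp; omega)
      rw [List.drop_eq_nil_of_le hlen]
      simp [solWhile, hidx, sumSz]
    · have hlt : idx < L.length := by
        by_contra hc
        rw [List.getElem?_eq_none (by omega)] at hidx; exact absurd hidx (by simp)
      have hdrop : L.drop idx = t :: L.drop (idx + 1) := by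
        rw [List.drop_eq_getElem_cons hlt]
        congr 1
        have := List.getElem?_eq_getElem hlt
        rw [hidx] at this; exact (Option.some.inj this).symm
      rw [hdrop]
      by_cases hts : t.2.2 < s
      · simp only [solWhile, hidx, if_pos hts, List.takeWhile_cons, decide_eq_true hts]
        rw [ih (idx+1) _ _ (by omega)]
        simp [modStep, sumSz]
        constructor
        · ring
        · omega
      · simp only [solWhile, hidx, if_neg hts, List.takeWhile_cons]
        simp [hts, sumSz]

theorem getD_fold_mod (K : List (Int × Int × Int)) :
    ∀ (d : PySem.Dict Int Int) (c : Int),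
    (K.foldl modStep d).getD c 0 = d.getD c 0 + ((K.filter (fun t => t.2.1 == c)).map (·.2.2)).sum := by
  induction K with
  | nil => simp
  | cons t K ih =>
    intro d c
    simp only [List.foldl_cons, List.filter_cons, ih]
    by_cases h : t.2.1 = c
    · simp [modStep, h, PySem.Dict.getD_modify_self]
      ring
    · have hb : (t.2.1 == c) = false := by simp [h]
      simp [modStep, hb]
      rw [PySem.Dict.getD_modify_of_ne]
      exact fun e => h e.symm

theorem takeWhile_append_stop {α : Type} (p : α → Bool) (y : α) (hy : p y = false) :
    ∀ (xs ys : List α), (xs ++ y :: ys).takeWhile p = xs.takeWhile p := by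
  intro xs ys
  induction xs with
  | nil => simp [hy]
  | cons x xs ih => rw [List.cons_append, List.takeWhile_cons, List.takeWhile_cons, ih]

theorem takeWhile_append_all {α : Type} (p : α → Bool) :
    ∀ (xs ys : List α), (∀ x ∈ xs, p x = true) → (xs ++ ys).takeWhile p = xs ++ ys.takeWhile p := by
  intro xs ys h
  induction xs with
  | nil => simp
  | cons x xs ih =>
    simp only [List.cons_append, List.takeWhile_cons, h x (by simp), if_true]
    rw [ih (fun x hx => h x (by simp [hx]))]

theorem loop_inv (L : List (Int × Int × Int))
    (hpw : L.Pairwise (fun a b => a.2.2 ≤ b.2.2)) :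
    ∀ (R mid pre : List (Int × Int × Int)) (sums : List Int),
    L = pre ++ mid ++ R →
    (∀ x ∈ pre, ∀ u ∈ R, x.2.2 < u.2.2) →
    (R.foldl (solBody L) (sums, pre.foldl modStep PySem.Dict.empty, sumSz pre, pre.length)).1
      = R.foldl (fun acc t => PySem.List.pySetD acc t.1 (valL L t)) sums := by
  intro R
  induction R with
  | nil => intro mid pre sums _ _; simp
  | cons t R' ih =>
    intro mid pre sums hL hinv
    have hpt : (fun u => decide (u.2.2 < t.2.2)) t = false := by simp
    have hdrop : L.drop pre.length = mid ++ t :: R' := by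
      rw [hL, List.append_assoc, List.drop_left]
    have hT : (L.drop pre.length).takeWhile (fun u => decide (u.2.2 < t.2.2))
        = mid.takeWhile (fun u => decide (u.2.2 < t.2.2)) := by
      rw [hdrop, takeWhile_append_stop _ t hpt]
    have hpre' : pre ++ mid.takeWhile (fun u => decide (u.2.2 < t.2.2))
        = L.takeWhile (fun u => decide (u.2.2 < t.2.2)) := by
      rw [hL, List.append_assoc, takeWhile_append_all _ _ _
        (fun x hx => by simp; exact hinv x hx t (by simp)),
        takeWhile_append_stop _ t hpt]
    have hval : sumSz pre + sumSz (mid.takeWhile (fun u => decide (u.2.2 < t.2.2))) -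
        ((mid.takeWhile (fun u => decide (u.2.2 < t.2.2))).foldl modStep
          (pre.foldl modStep PySem.Dict.empty)).getD t.2.1 0 = valL L t := by
      rw [← List.foldl_append]
      have hsum : sumSz pre + sumSz (mid.takeWhile (fun u => decide (u.2.2 < t.2.2)))
          = sumSz (pre ++ mid.takeWhile (fun u => decide (u.2.2 < t.2.2))) := by simp [sumSz]
      rw [hsum, hpre']
      unfold valL
      congr 1
      rw [getD_fold_mod]
      simp
    have hstep : solBody L (sums, pre.foldl modStep PySem.Dict.empty, sumSz pre, pre.length) t
        = (PySem.List.pySetD sums t.1 (valL L t),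
           (mid.takeWhile (fun u => decide (u.2.2 < t.2.2))).foldl modStep
             (pre.foldl modStep PySem.Dict.empty),
           sumSz pre + sumSz (mid.takeWhile (fun u => decide (u.2.2 < t.2.2))),
           pre.length + (mid.takeWhile (fun u => decide (u.2.2 < t.2.2))).length) := by
      unfold solBody
      rw [while_spec L t.2.2 _ _ _ _ (le_refl _), hT]
      dsimp only
      rw [hval]
    rw [List.foldl_cons, List.foldl_cons, hstep, ← List.foldl_append]
    have hsum : sumSz pre + sumSz (mid.takeWhile (fun u => decide (u.2.2 < t.2.2)))
        = sumSz (pre ++ mid.takeWhile (fun u => decide (u.2.2 < t.2.2))) := by simp [sumSz]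
    rw [hsum, ← List.length_append]
    exact ih (mid.dropWhile (fun u => decide (u.2.2 < t.2.2)) ++ [t])
      (pre ++ mid.takeWhile (fun u => decide (u.2.2 < t.2.2))) _
      (by rw [hL]; simp only [List.append_assoc, List.singleton_append]
          congr 1
          rw [← List.append_assoc, List.takeWhile_append_dropWhile])
      (by intro x hx u hu
          rw [hpre'] at hx
          have hxp := List.mem_takeWhile_imp hx
          have h1 : x.2.2 < t.2.2 := by simpa using hxp
          have h2 : t.2.2 ≤ u.2.2 := by
            have hsub : (t :: R').Sublist L := by
              rw [hL]
              exact (List.suffix_append _ _).sublist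
            exact (List.pairwise_cons.mp (hpw.sublist hsub)).1 u hu
          omega)

theorem takeWhile_eq_filter_sorted (s : Int) :
    ∀ (L : List (Int × Int × Int)), L.Pairwise (fun a b => a.2.2 ≤ b.2.2) →
    L.takeWhile (fun u => decide (u.2.2 < s)) = L.filter (fun u => decide (u.2.2 < s)) := by
  intro L
  induction L with
  | nil => simp
  | cons x L ih =>
    intro hpw
    rcases List.pairwise_cons.mp hpw with ⟨hx, hL⟩
    by_cases hxs : x.2.2 < s
    · simp [hxs, ih hL]
    · simp only [List.takeWhile_cons, List.filter_cons, decide_eq_true_eq]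
      rw [if_neg hxs, if_neg hxs]
      rw [List.filter_eq_nil_iff.mpr]
      intro u hu
      simp only [decide_eq_true_eq]
      have := hx u hu
      omega

theorem sum_split (q : (Int × Int × Int) → Bool) :
    ∀ (M : List (Int × Int × Int)),
    ((M.filter q).map (·.2.2)).sum + ((M.filter (fun u => !q u)).map (·.2.2)).sum = sumSz M := by
  intro M
  induction M with
  | nil => simp [sumSz]
  | cons x M ih =>
    by_cases h : q x <;> simp [h, sumSz] at * <;> omega

theorem valL_eq (balls : List (Int × Int)) (t : Int × Int × Int) :
    valL (PySem.List.sorted (PySem.List.enumerate balls) (fun x => x.2.2) false) t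
      = gval balls t.2 := by
  have hpw := PySem.List.sorted_pairwise (xs := PySem.List.enumerate balls)
    (key := fun x : Int × Int × Int => x.2.2)
  unfold valL
  rw [takeWhile_eq_filter_sorted _ _ hpw]
  have hsplit := sum_split (fun u => u.2.1 == t.2.1)
    ((PySem.List.sorted (PySem.List.enumerate balls) (fun x => x.2.2) false).filter
      (fun u => decide (u.2.2 < t.2.2)))
  have hB : ((((PySem.List.sorted (PySem.List.enumerate balls) (fun x => x.2.2) false).filter
        (fun u => decide (u.2.2 < t.2.2))).filter
          (fun u => !(u.2.1 == t.2.1))).map (·.2.2)).sum = gval balls t.2 := by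
    rw [List.filter_filter]
    have hc : ∀ u : Int × Int × Int,
        (!(u.2.1 == t.2.1) && decide (u.2.2 < t.2.2))
          = (fun u : Int × Int × Int => decide (u.2.2 < t.2.2 ∧ u.2.1 ≠ t.2.1)) u := by
      intro u
      by_cases h1 : u.2.2 < t.2.2 <;> by_cases h2 : u.2.1 = t.2.1 <;> simp [h1, h2]
    rw [List.filter_congr (fun u _ => hc u)]
    have hperm := ((PySem.List.sorted_perm (PySem.List.enumerate balls)
        (fun x : Int × Int × Int => x.2.2) false).filter
        (fun u : Int × Int × Int => decide (u.2.2 < t.2.2 ∧ u.2.1 ≠ t.2.1))).map (f := (·.2.2))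
    rw [hperm.sum_eq]
    unfold gval
    have hballs : balls.filter (fun x => decide (x.2 < t.2.2 ∧ x.1 ≠ t.2.1))
        = ((PySem.List.enumerate balls).filter
            (fun u => decide (u.2.2 < t.2.2 ∧ u.2.1 ≠ t.2.1))).map (·.2) := by
      conv_lhs => rw [← PySem.List.map_snd_enumerate balls 0]
      rw [List.filter_map]
      rfl
    rw [hballs, List.map_map]
    rfl
  omega

theorem fold_set_find (v' : (Int × Int × Int) → Int) :
    ∀ (K : List (Int × Int × Int)) (init : List Int) (i : Nat), i < init.length →
    (K.map (·.1)).Nodup →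
    (∀ t ∈ K, ∃ k : Nat, t.1 = (k : Int)) →
    (K.foldl (fun acc t => PySem.List.pySetD acc t.1 (v' t)) init)[i]? =
      (match K.find? (fun t => t.1 == (i : Int)) with
       | some t => some (v' t)
       | none => init[i]?) := by
  intro K
  induction K with
  | nil => intro init i hi _ _; simp
  | cons t K' ih =>
    intro init i hi hnd hids
    obtain ⟨k, hk⟩ := hids t (by simp)
    have hset : PySem.List.pySetD init t.1 (v' t) = init.set k (v' t) := by
      rw [hk]; simp
    by_cases hti : t.1 = (i : Int)
    · have hkieq : k = i := by omega
      have hfind : (t :: K').find? (fun t => t.1 == (i : Int)) = some t :=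
        List.find?_cons_of_pos (by simp [hti])
      rw [hfind, List.foldl_cons, hset,
        ih _ i (by simpa using hi) (by simpa using (List.nodup_cons.mp hnd).2)
          (fun u hu => hids u (by simp [hu]))]
      have hnone : K'.find? (fun t => t.1 == (i : Int)) = none := by
        rw [List.find?_eq_none]
        intro u hu
        simp only [beq_iff_eq]
        intro he
        exact (List.nodup_cons.mp hnd).1
          (List.mem_map.mpr ⟨u, hu, by show u.1 = t.1; rw [he, hti]⟩)
      rw [hnone]
      subst hkieq
      simp [hi]
    · have hfind : (t :: K').find? (fun t => t.1 == (i : Int)) =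
          K'.find? (fun t => t.1 == (i : Int)) :=
        List.find?_cons_of_neg (by simp [hti])
      rw [hfind, List.foldl_cons, hset,
        ih _ i (by simpa using hi) (by simpa using (List.nodup_cons.mp hnd).2)
          (fun u hu => hids u (by simp [hu]))]
      rcases hf : K'.find? (fun t => t.1 == (i : Int)) with _ | u <;> rw [hf]
      · exact List.getElem?_set_ne (by omega)

theorem fold_set_length (v' : (Int × Int × Int) → Int) :
    ∀ (K : List (Int × Int × Int)) (init : List Int),
    (K.foldl (fun acc t => PySem.List.pySetD acc t.1 (v' t)) init).length = init.length := by
  intro K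
  induction K with
  | nil => intro init; rfl
  | cons t K' ih => intro init; rw [List.foldl_cons, ih, PySem.List.length_pySetD]

theorem solution_eq (balls : List (Int × Int)) :
    solution balls =
      (PySem.List.sorted (PySem.List.enumerate balls) (fun x => x.2.2) false).foldl
        (fun acc t => PySem.List.pySetD acc t.1
          (valL (PySem.List.sorted (PySem.List.enumerate balls) (fun x => x.2.2) false) t))
        (List.replicate balls.length 0) := by
  have hE : (PySem.List.enumerate balls).map (fun p => (p.1, p.2.1, p.2.2))
      = PySem.List.enumerate balls := by
    have hfe : (fun p : Int × (Int × Int) => (p.1, p.2.1, p.2.2)) = id := funext fun p => rfl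
    rw [hfe, List.map_id]
  unfold solution
  simp only [hE]
  exact loop_inv _ (PySem.List.sorted_pairwise _ _) _ [] [] _ rfl (by simp)

-- ===== VERDICT (by name: the statement is the Claim_ definition above) =====
theorem solution_spec : Claim_equal_solution := by
  intro balls _
  unfold Spec_solution
  rw [solution_alt_eq_map, solution_eq]
  have hv : (fun (acc : List Int) (t : Int × Int × Int) => PySem.List.pySetD acc t.1
        (valL (PySem.List.sorted (PySem.List.enumerate balls) (fun x => x.2.2) false) t))
      = fun acc t => PySem.List.pySetD acc t.1 (gval balls t.2) :=
    funext fun acc => funext fun t => by rw [valL_eq]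
  rw [hv]
  have hnd : ((PySem.List.sorted (PySem.List.enumerate balls) (fun x => x.2.2) false).map
      (·.1)).Nodup := by
    have hp1 := (PySem.List.sorted_perm (PySem.List.enumerate balls)
      (fun x : Int × Int × Int => x.2.2) false).map (f := (·.1))
    refine hp1.nodup_iff.mpr ?_
    exact (List.pairwise_map.mpr (PySem.List.pairwise_lt_enumerate balls 0)).imp
      (fun h => by omega)
  have hids : ∀ t ∈ PySem.List.sorted (PySem.List.enumerate balls) (fun x => x.2.2) false,
      ∃ k : Nat, t.1 = (k : Int) := by
    intro t ht
    rw [PySem.List.mem_sorted] at ht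
    obtain ⟨k, hk, hte⟩ := (PySem.List.mem_enumerate_iff _ _ _).mp ht
    exact ⟨k, by simp [hte]⟩
  apply List.ext_getElem?
  intro i
  by_cases hi : i < balls.length
  · rw [fold_set_find (fun t => gval balls t.2) _ _ i (by simpa) hnd hids]
    have hmem : ((i : Int), balls[i]) ∈
        PySem.List.sorted (PySem.List.enumerate balls) (fun x => x.2.2) false := by
      rw [PySem.List.mem_sorted]
      exact (PySem.List.mem_enumerate_iff _ _ _).mpr ⟨i, hi, by simp⟩
    rcases hf : (PySem.List.sorted (PySem.List.enumerate balls) (fun x => x.2.2) false).find?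
        (fun t => t.1 == (i : Int)) with _ | u
    · exact absurd (List.find?_eq_none.mp hf _ hmem) (by simp)
    · have hu1 : u.1 = (i : Int) := by simpa using List.find?_some hf
      have humem := List.mem_of_find?_eq_some hf
      rw [PySem.List.mem_sorted] at humem
      obtain ⟨k, hk, hue⟩ := (PySem.List.mem_enumerate_iff _ _ _).mp humem
      have hki : k = i := by
        rw [hue] at hu1
        simp at hu1
        omega
      subst hki
      rw [hf]
      simp [hue, hi]
  · rw [List.getElem?_eq_none, List.getElem?_eq_none]
    · simpa using by omega
    · rw [fold_set_length]
      simpa using by omega
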